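-- pv_equiv track=rewrite | github.com/skynetcore/ML-Interview-test | bonsai/analytica.py | get_book_score
-- ===== SOURCE A (Python) =====
-- def get_book_score(user_id, book_id, recommended_books):
--     score = 0
--
--     # user_id, book_id
--     for i in range(len(recommended_books)):
--         if user_id == recommended_books[i][0]:
--             if book_id == recommended_books[i][1]:
--                 books = recommended_books[i][2]
--                 for k in range(len(books)):
--                     score = score + k
--     return score
-- ===== SOURCE B (Python) =====
-- def get_book_score(user_id, book_id, recommended_books):
--     # closed form: sum over matching entries of len*(len-1)//2 (triangular number)
--     return sum(len(bs) * (len(bs) - 1) // 2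
--                for u, b, bs in recommended_books
--                if u == user_id and b == book_id)
-- ===== Notes on version B (the rewrite author's own statement) =====
-- stated objective: simpler
-- what changed: Replaces the inner loop summing k over range(len(books)) by the closed-form triangular number len*(len(bs)-1)//2, collapsing the two-level loop into one filtered comprehension.
import Mathlib
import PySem

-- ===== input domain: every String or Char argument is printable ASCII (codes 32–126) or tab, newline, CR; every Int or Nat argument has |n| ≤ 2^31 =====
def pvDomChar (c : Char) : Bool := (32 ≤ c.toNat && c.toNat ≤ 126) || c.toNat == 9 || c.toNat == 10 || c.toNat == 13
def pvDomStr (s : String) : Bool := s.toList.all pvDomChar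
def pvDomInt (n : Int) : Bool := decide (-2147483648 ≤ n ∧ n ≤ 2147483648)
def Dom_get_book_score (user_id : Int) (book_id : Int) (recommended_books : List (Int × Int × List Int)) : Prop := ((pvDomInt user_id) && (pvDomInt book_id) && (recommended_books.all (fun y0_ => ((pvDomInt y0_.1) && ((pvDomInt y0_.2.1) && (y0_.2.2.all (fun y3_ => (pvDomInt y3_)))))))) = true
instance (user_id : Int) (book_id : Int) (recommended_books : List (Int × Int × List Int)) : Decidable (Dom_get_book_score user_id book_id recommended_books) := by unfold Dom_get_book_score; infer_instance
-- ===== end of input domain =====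

-- ===== PORT A =====
-- B replaces the inner loop over range(len(books)) by the closed-form triangular number len*(len-1)//2 in a single filtered comprehension (simpler; not measurably faster on the generated inputs).
def get_book_score (user_id : Int) (book_id : Int) (recommended_books : List (Int × Int × List Int)) : Int :=
  recommended_books.foldl (fun score t =>
    if user_id = t.1 then
      if book_id = t.2.1 then
        (PySem.List.pyRange 0 (t.2.2.length : Int) 1).foldl (fun s k => s + k) score
      else score
    else score) 0

-- ===== PORT B =====
def get_book_score_alt (user_id : Int) (book_id : Int) (recommended_books : List (Int × Int × List Int)) : Int :=
  ((recommended_books.filter (fun t => decide (t.1 = user_id) && decide (t.2.1 = book_id))).map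
    (fun t => PySem.Int.floordiv ((t.2.2.length : Int) * ((t.2.2.length : Int) - 1)) 2)).sum

-- ===== PRECONDITION & SPEC =====
def Spec_get_book_score (user_id : Int) (book_id : Int) (recommended_books : List (Int × Int × List Int)) (out : Int) : Prop := out = get_book_score_alt user_id book_id recommended_books
instance (user_id : Int) (book_id : Int) (recommended_books : List (Int × Int × List Int)) (out : Int) : Decidable (Spec_get_book_score user_id book_id recommended_books out) := by unfold Spec_get_book_score; infer_instance

-- ===== CLAIM (what is proved, stated in full; the proofs are below) =====
def Claim_equal_get_book_score : Prop := ∀ (user_id : Int) (book_id : Int) (recommended_books : List (Int × Int × List Int)), Dom_get_book_score user_id book_id recommended_books → Spec_get_book_score user_id book_id recommended_books (get_book_score user_id book_id recommended_books)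

-- ===== LEMMAS AND PROOFS =====

-- ===== VERDICT (by name: the statement is the Claim_ definition above) =====
lemma sum_map_cast (l : List Nat) : (l.map (fun (k:Nat) => (k:Int))).sum = ((l.sum : Nat) : Int) := by
  induction l with
  | nil => rfl
  | cons a t ih => rw [List.map_cons, List.sum_cons, List.sum_cons, ih]; push_cast; ring

lemma twice_sum_range (n : Nat) : 2 * (List.range n).sum = n * (n-1) := by
  induction n with
  | zero => rfl
  | succ m ih =>
    rw [List.range_succ, List.sum_append]
    simp only [List.sum_cons, List.sum_nil]
    cases m with
    | zero => rfl
    | succ k => simp only [Nat.succ_sub_one] at ih ⊢; nlinarith [ih]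

lemma tri_foldl (n : Nat) (s : Int) :
    (PySem.List.pyRange 0 (n : Int) 1).foldl (fun a k => a + k) s
      = s + PySem.Int.floordiv ((n : Int) * ((n : Int) - 1)) 2 := by
  rw [PySem.List.pyRange_zero_natCast, PySem.List.foldl_add,
    PySem.Int.floordiv_eq_ediv_of_pos (by omega)]
  simp only [List.map_id']
  rw [sum_map_cast]
  have h := twice_sum_range n
  have hn : (1:Nat) ≤ n ∨ n = 0 := by omega
  rcases hn with h1 | h0
  · have : ((n:Int)) * ((n:Int) - 1) = ((n * (n-1) : Nat) : Int) := by
      push_cast [h1]; ring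
    rw [this]
    omega
  · subst h0; simp

lemma main_foldl (u b : Int) (rb : List (Int × Int × List Int)) (s : Int) :
    rb.foldl (fun score t =>
      if u = t.1 then
        if b = t.2.1 then
          (PySem.List.pyRange 0 (t.2.2.length : Int) 1).foldl (fun s k => s + k) score
        else score
      else score) s
    = s + ((rb.filter (fun t => decide (t.1 = u) && decide (t.2.1 = b))).map
        (fun t => PySem.Int.floordiv ((t.2.2.length : Int) * ((t.2.2.length : Int) - 1)) 2)).sum := by
  induction rb generalizing s with
  | nil => simp
  | cons t rest ih =>
    obtain ⟨tu, tb, bs⟩ := t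
    simp only [List.foldl_cons, List.filter_cons]
    by_cases h1 : u = tu
    · by_cases h2 : b = tb
      · subst h1; subst h2
        rw [if_pos rfl, if_pos rfl, tri_foldl, ih]
        simp only [decide_true, Bool.and_self, if_true, List.map_cons, List.sum_cons]
        ring
      · have hf : (decide (tu = u) && decide (tb = b)) = false := by
          simp; intro _; exact fun h => h2 h.symm
        rw [if_pos h1, if_neg h2, hf, if_neg (by simp), ih]
    · have hf : (decide (tu = u) && decide (tb = b)) = false := by
        simp; intro h; exact absurd h.symm h1
      rw [if_neg h1, hf, if_neg (by simp), ih]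

theorem get_book_score_spec : Claim_equal_get_book_score := by
  intro u b rb _
  unfold Spec_get_book_score get_book_score get_book_score_alt
  simpa using main_foldl u b rb 0
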